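-- pv_equiv track=rewrite | github.com/afshin-arj/FreegsNKE_MAST | src/mast_freegsnke/windowing.py | _find_time_column
-- ===== SOURCE A (Python) =====
-- from typing import Dict, List, Optional, Tuple
--
-- def _find_time_column(cols: List[str]) -> str:
--     # Be liberal: MastApp exports often use 'time' but allow other variants.
--     cand = [c for c in cols if c.lower() in ("time", "t", "t[s]", "time_s", "time_sec", "seconds")]
--     if cand:
--         return cand[0]
--     # fallback: first column that looks like time
--     for c in cols:
--         cl = c.lower()
--         if "time" in cl and ("s" in cl or "sec" in cl):
--             return c
--     return cols[0]
-- ===== SOURCE B (Python) =====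
-- def _find_time_column(cols):
--     EXACT = ("time", "t", "t[s]", "time_s", "time_sec", "seconds")
--
--     def rank(c):
--         cl = c.lower()
--         if cl in EXACT:
--             return 0
--         if "time" in cl and ("s" in cl or "sec" in cl):
--             return 1
--         return 2
--
--     _, c = min(enumerate(cols), key=lambda ic: (rank(ic[1]), ic[0]))
--     return c
-- ===== Notes on version B (the rewrite author's own statement) =====
-- stated objective: alternative
-- what changed: Replaced A's staged search (build the exact-name candidate list, fall back to a heuristic scan, then cols[0]) by a score-and-argmin: every column gets a rank (0 exact, 1 heuristic, 2 other) and B returns min(enumerate(cols), key=(rank, index)), whose lexicographic minimum reproduces A's priority order.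
import Mathlib
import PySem

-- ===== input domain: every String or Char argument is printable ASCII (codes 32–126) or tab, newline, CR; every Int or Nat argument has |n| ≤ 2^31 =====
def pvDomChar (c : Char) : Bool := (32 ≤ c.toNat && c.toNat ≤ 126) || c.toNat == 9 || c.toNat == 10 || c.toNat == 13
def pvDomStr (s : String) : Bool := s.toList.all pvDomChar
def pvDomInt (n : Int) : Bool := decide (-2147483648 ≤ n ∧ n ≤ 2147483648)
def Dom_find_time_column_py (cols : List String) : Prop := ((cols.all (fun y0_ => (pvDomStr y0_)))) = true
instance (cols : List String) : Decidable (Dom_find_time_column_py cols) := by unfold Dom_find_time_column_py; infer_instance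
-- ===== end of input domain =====

-- B replaces A's staged scans (exact-name filter, then a heuristic loop, then cols[0]) by a
-- score-and-argmin: each column gets a rank (0 exact / 1 heuristic / 2 other) and B returns
-- min(enumerate(cols), key=(rank, index)); return-value equivalence on non-empty cols
-- (A raises IndexError and B ValueError on []).

-- ===== PORT A =====
-- the tuple ("time", "t", "t[s]", "time_s", "time_sec", "seconds")
def pvExactNames : List String := ["time", "t", "t[s]", "time_s", "time_sec", "seconds"]

-- predicate of A's second loop: "time" in cl and ("s" in cl or "sec" in cl)
def pvHeur (cl : String) : Bool :=
  PySem.Str.isIn "time" cl && (PySem.Str.isIn "s" cl || PySem.Str.isIn "sec" cl)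

def find_time_column_py (cols : List String) : String :=
  -- cand = [c for c in cols if c.lower() in (...)]
  let cand := cols.filter (fun c => pvExactNames.contains (PySem.Str.lower c))
  match cand with
  | c :: _ => c          -- if cand: return cand[0]
  | [] =>
    -- for c in cols: ... return c
    match cols.find? (fun c => pvHeur (PySem.Str.lower c)) with
    | some c => c
    | none => (PySem.List.pyGet? cols 0).getD ""   -- cols[0]; IndexError (none) excluded by Pre_

-- ===== PORT B =====
-- B's EXACT tuple (duplicated so B shares no helper with A's port)
def pvExactB : List String := ["time", "t", "t[s]", "time_s", "time_sec", "seconds"]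

-- B's rank(c): 0 exact name, 1 looks-like-time, 2 otherwise
def pvRank (c : String) : Int :=
  -- cl = c.lower()
  if pvExactB.contains (PySem.Str.lower c) then 0
  else if PySem.Str.isIn "time" (PySem.Str.lower c) &&
      (PySem.Str.isIn "s" (PySem.Str.lower c) || PySem.Str.isIn "sec" (PySem.Str.lower c)) then 1
  else 2

def find_time_column_py_alt (cols : List String) : String :=
  -- _, c = min(enumerate(cols), key=lambda ic: (rank(ic[1]), ic[0])); return c
  match PySem.List.min2? (PySem.List.enumerate cols) (fun ic => pvRank ic.2) (fun ic => ic.1) with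
  | some ic => ic.2
  | none => ""   -- min() on the empty sequence raises ValueError; excluded by Pre_

-- ===== PRECONDITION & SPEC =====
-- Pre_ excludes only the empty list, on which A raises IndexError (and B ValueError).
def Pre_find_time_column_py (cols : List String) : Prop := cols ≠ []
instance (cols : List String) : Decidable (Pre_find_time_column_py cols) := by
  unfold Pre_find_time_column_py; infer_instance

def pvWitness_find_time_column_py : List String := ["density", "Time_S", "x"]

def Spec_find_time_column_py (cols : List String) (out : String) : Prop := out = find_time_column_py_alt cols
instance (cols : List String) (out : String) : Decidable (Spec_find_time_column_py cols out) := by unfold Spec_find_time_column_py; infer_instance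

-- ===== CLAIM =====
def Claim_equal_find_time_column_py : Prop := ∀ (cols : List String), Dom_find_time_column_py cols → Pre_find_time_column_py cols → Spec_find_time_column_py cols (find_time_column_py cols)

-- ===== LEMMAS AND PROOFS =====

-- the one fold step of min2? at B's keys
def pvStep (acc : Option (Int × String)) (x : Int × String) : Option (Int × String) :=
  match acc with
  | none => some x
  | some m =>
      if (decide (pvRank x.2 < pvRank m.2) ||
          !decide (pvRank m.2 < pvRank x.2) && decide (x.1 < m.1)) = true then some x else some m

theorem pvRank_cases (c : String) : pvRank c = 0 ∨ pvRank c = 1 ∨ pvRank c = 2 := by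
  simp only [pvRank]
  split_ifs <;> simp

-- what the running strict-min keeps: first rank-0 pair, else first rank-1 pair, else the seed
def pvBest (l : List (Int × String)) (m : Int × String) : Int × String :=
  match (m :: l).find? (fun p => pvRank p.2 == 0) with
  | some p => p
  | none => ((m :: l).find? (fun p => pvRank p.2 == 1)).getD m

theorem pvEnum_lb (cols : List String) (s : Int) :
    ∀ p ∈ PySem.List.enumerate cols s, s ≤ p.1 := by
  induction cols generalizing s with
  | nil => simp [PySem.List.enumerate]
  | cons c t ih =>
    intro p hp
    simp only [PySem.List.enumerate, List.mem_cons] at hp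
    rcases hp with rfl | hp
    · simp
    · have := ih (s + 1) p hp; omega

theorem pvEnum_pairwise (cols : List String) (s : Int) :
    (PySem.List.enumerate cols s).Pairwise (fun a b => a.1 < b.1) := by
  induction cols generalizing s with
  | nil => simp [PySem.List.enumerate]
  | cons c t ih =>
    simp only [PySem.List.enumerate, List.pairwise_cons]
    exact ⟨fun p hp => by have := pvEnum_lb t (s + 1) p hp; simpa using by omega, ih (s + 1)⟩

theorem pvFold_best (l : List (Int × String)) (m : Int × String)
    (h : (m :: l).Pairwise (fun a b => a.1 < b.1)) :
    l.foldl pvStep (some m) = some (pvBest l m) := by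
  induction l generalizing m with
  | nil =>
    unfold pvBest
    rcases pvRank_cases m.2 with hm | hm | hm <;> simp [hm]
  | cons x t ih =>
    rw [List.pairwise_cons] at h
    have hxm : ¬ (x.1 < m.1) := by have := h.1 x (by simp); omega
    have hstep : pvStep (some m) x = some (if pvRank x.2 < pvRank m.2 then x else m) := by
      simp only [pvStep, hxm]
      split_ifs <;> simp_all
    rw [List.foldl_cons, hstep]
    have ht := List.pairwise_cons.mp h.2
    by_cases hlt : pvRank x.2 < pvRank m.2
    · rw [if_pos hlt, ih x h.2]
      congr 1
      unfold pvBest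
      rcases pvRank_cases m.2 with hm | hm | hm <;>
        rcases pvRank_cases x.2 with hx | hx | hx <;>
        simp [hm, hx] at *
    · rw [if_neg hlt,
        ih m (List.pairwise_cons.mpr ⟨fun p hp => h.1 p (by simp [hp]), ht.2⟩)]
      congr 1
      unfold pvBest
      rcases pvRank_cases m.2 with hm | hm | hm <;>
        rcases pvRank_cases x.2 with hx | hx | hx <;>
        simp [hm, hx] at *

theorem pvFind_enum (cols : List String) (s : Int) (q : String → Bool) :
    ((PySem.List.enumerate cols s).find? (fun p => q p.2)).map Prod.snd = cols.find? q := by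
  induction cols generalizing s with
  | nil => simp [PySem.List.enumerate]
  | cons c t ih =>
    by_cases hq : q c <;> simp [PySem.List.enumerate, hq, ih]

theorem pvFind_congr {α : Type} (l : List α) (p q : α → Bool)
    (h : ∀ x ∈ l, p x = q x) : l.find? p = l.find? q := by
  induction l with
  | nil => rfl
  | cons c t ih =>
    have hc := h c (by simp)
    by_cases hp : p c
    · simp [hp, ← hc]
    · simp [hp, ← hc, ih fun x hx => h x (by simp [hx])]

theorem pvHead_filter (p : String → Bool) (l : List String) :
    (l.filter p).head? = l.find? p := by
  induction l with
  | nil => rfl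
  | cons c cs ih =>
    by_cases hp : p c <;> simp [hp, ih]

-- rank characterisations
theorem pvRank_eq_zero (c : String) :
    (pvRank c == 0) = pvExactNames.contains (PySem.Str.lower c) := by
  unfold pvRank pvExactNames pvExactB; split_ifs <;> simp_all

theorem pvRank_eq_one (c : String) (hne : ¬ pvExactNames.contains (PySem.Str.lower c)) :
    (pvRank c == 1) = pvHeur (PySem.Str.lower c) := by
  unfold pvRank pvHeur pvExactNames pvExactB at *
  split_ifs <;> simp_all

-- ===== VERDICT =====
theorem find_time_column_py_spec : Claim_equal_find_time_column_py := by
  intro cols _ hpre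
  unfold Spec_find_time_column_py
  match cols with
  | [] => exact absurd rfl hpre
  | c :: rest =>
    have henum : PySem.List.enumerate (c :: rest) 0 = (0, c) :: PySem.List.enumerate rest 1 := by
      simp [PySem.List.enumerate]
    have hpw : (((0, c) : Int × String) :: PySem.List.enumerate rest 1).Pairwise
        (fun a b => a.1 < b.1) := henum ▸ pvEnum_pairwise (c :: rest) 0
    -- B's side reduces to pvBest of the enumerated tail
    have hB : find_time_column_py_alt (c :: rest) =
        (pvBest (PySem.List.enumerate rest 1) (0, c)).2 := by
      have hfold : PySem.List.min2? (PySem.List.enumerate (c :: rest))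
          (fun ic => pvRank ic.2) (fun ic => ic.1)
          = (PySem.List.enumerate (c :: rest) 0).foldl pvStep none := by
        unfold PySem.List.min2?
        apply PySem.List.foldl_congr_mem
        intro acc x _
        cases acc <;> rfl
      unfold find_time_column_py_alt
      rw [hfold, henum, List.foldl_cons,
        show pvStep none (0, c) = some (0, c) from rfl,
        pvFold_best _ _ hpw]
    rw [hB]
    unfold pvBest
    rw [← henum]
    -- A's side: filter head = find?, then staged find?s
    have hA : find_time_column_py (c :: rest) =
        (match (c :: rest).find? (fun c => pvExactNames.contains (PySem.Str.lower c)) with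
         | some c => c
         | none => match (c :: rest).find? (fun c => pvHeur (PySem.Str.lower c)) with
                   | some c => c
                   | none => (PySem.List.pyGet? (c :: rest) 0).getD "") := by
      unfold find_time_column_py
      have hh := pvHead_filter (fun c => pvExactNames.contains (PySem.Str.lower c)) (c :: rest)
      cases hfil : (c :: rest).filter (fun c => pvExactNames.contains (PySem.Str.lower c)) with
      | nil =>
        rw [hfil] at hh; simp only [List.head?_nil] at hh
        rw [← hh]
      | cons a t =>
        rw [hfil] at hh; simp only [List.head?_cons] at hh
        rw [← hh]
    rw [hA]
    -- exact-match phase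
    have e0 := pvFind_enum (c :: rest) 0 (fun c => pvRank c == 0)
    have hq0 : ((c :: rest).find? (fun c => pvRank c == 0)) =
        (c :: rest).find? (fun c => pvExactNames.contains (PySem.Str.lower c)) :=
      pvFind_congr _ _ _ (fun x _ => pvRank_eq_zero x)
    cases hfe : (PySem.List.enumerate (c :: rest) 0).find? (fun p => pvRank p.2 == 0) with
    | some p =>
      have hsome : (c :: rest).find? (fun c => pvExactNames.contains (PySem.Str.lower c)) =
          some p.2 := by rw [← hq0, ← e0, hfe]; rfl
      rw [hsome]
    | none =>
      have hnone : (c :: rest).find? (fun c => pvExactNames.contains (PySem.Str.lower c)) = none := by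
        rw [← hq0, ← e0, hfe]; rfl
      rw [hnone]
      have hno : ∀ x ∈ (c :: rest), ¬ pvExactNames.contains (PySem.Str.lower x) := by
        intro x hx hcon
        have := List.find?_eq_none.mp hnone x hx
        simp_all
      have hq1 : ((c :: rest).find? (fun c => pvRank c == 1)) =
          (c :: rest).find? (fun c => pvHeur (PySem.Str.lower c)) :=
        pvFind_congr _ _ _ (fun x hx => pvRank_eq_one x (hno x hx))
      have e1 := pvFind_enum (c :: rest) 0 (fun c => pvRank c == 1)
      cases hf1 : (PySem.List.enumerate (c :: rest) 0).find? (fun p => pvRank p.2 == 1) with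
      | some p =>
        have hsome1 : (c :: rest).find? (fun c => pvHeur (PySem.Str.lower c)) = some p.2 := by
          rw [← hq1, ← e1, hf1]; rfl
        rw [hsome1]; rfl
      | none =>
        have h1none : (c :: rest).find? (fun c => pvHeur (PySem.Str.lower c)) = none := by
          rw [← hq1, ← e1, hf1]; rfl
        rw [h1none]
        simp [PySem.List.pyGet?, PySem.List.pyIdx?]
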